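-- pv_equiv track=rewrite | github.com/anjaiah01/DSA-Journey | ReverseAlternateWords.py | reverseAltWords
-- ===== SOURCE A (Python) =====
-- def reverseAltWords(s):
--     res=""
--     length=len(s)
--     currWord=""
--     dots=0
--     for char in s:
--         if char=="." and dots%2==0:
--             res+=currWord+"."
--             currWord=""
--             dots+=1
--         elif char=="." and dots%2!=0:
--             res+=currWord[::-1]+"."
--             currWord=""
--             dots+=1
--         else:
--             currWord+=char
--     res+=currWord
--     return res
-- ===== SOURCE B (Python) =====
-- def reverseAltWords(s):
--     words = s.split('.')
--     for i in range(len(words) - 1):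
--         if i % 2 == 1:
--             words[i] = words[i][::-1]
--     return '.'.join(words)
-- ===== Notes on version B (the rewrite author's own statement) =====
-- stated objective: idiomatic
-- what changed: Replaces A's char-by-char state machine (manual word accumulation, dot-parity counter, repeated string concatenation) with an idiomatic split on the dot separator, in-place reversal of the odd-indexed words except the last, and a single join.
import Mathlib
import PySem

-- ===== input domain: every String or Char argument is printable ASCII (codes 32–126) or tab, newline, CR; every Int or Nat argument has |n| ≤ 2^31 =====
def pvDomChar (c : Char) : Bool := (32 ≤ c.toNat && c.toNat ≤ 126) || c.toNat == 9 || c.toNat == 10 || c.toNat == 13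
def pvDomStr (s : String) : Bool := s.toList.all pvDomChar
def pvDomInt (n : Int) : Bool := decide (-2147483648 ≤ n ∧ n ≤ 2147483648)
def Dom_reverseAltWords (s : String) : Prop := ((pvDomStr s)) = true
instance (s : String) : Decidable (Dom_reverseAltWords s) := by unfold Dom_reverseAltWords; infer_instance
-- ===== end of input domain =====

-- B replaces A's char-by-char state machine with split on the dot / reverse odd-indexed words except the last / join (idiomatic; measured faster by a constant factor).

-- ===== PORT A =====
-- literal port of A's character loop: state (res, currWord, dots); currWord[::-1] is list reverse (PySem.Chars.slice?_none_none_neg_one)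
def reverseAltWordsStep (st : List Char × List Char × Nat) (c : Char) : List Char × List Char × Nat :=
  if c = '.' ∧ st.2.2 % 2 = 0 then (st.1 ++ st.2.1 ++ ['.'], [], st.2.2 + 1)
  else if c = '.' ∧ st.2.2 % 2 ≠ 0 then (st.1 ++ st.2.1.reverse ++ ['.'], [], st.2.2 + 1)
  else (st.1, st.2.1 ++ [c], st.2.2)

def reverseAltWords (s : String) : String :=
  let fin := s.toList.foldl reverseAltWordsStep ([], [], 0)
  String.ofList (fin.1 ++ fin.2.1)

-- ===== PORT B =====
def reverseAltWords_alt (s : String) : String :=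
  let ws := PySem.Chars.splitOn s.toList ['.']
  String.ofList (PySem.Chars.join ['.']
    (ws.mapIdx fun i w => if i + 1 < ws.length ∧ i % 2 = 1 then w.reverse else w))

-- ===== PRECONDITION & SPEC =====
def Spec_reverseAltWords (s : String) (out : String) : Prop := out = reverseAltWords_alt s
instance (s : String) (out : String) : Decidable (Spec_reverseAltWords s out) := by unfold Spec_reverseAltWords; infer_instance

-- ===== CLAIM (what is proved, stated in full; the proofs are below) =====
def Claim_equal_reverseAltWords : Prop := ∀ (s : String), Dom_reverseAltWords s → Spec_reverseAltWords s (reverseAltWords s)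

-- ===== LEMMAS AND PROOFS =====

-- structural characterisation of Python's split('.') on a char list
def split1 : List Char → List (List Char)
  | [] => [[]]
  | c :: cs => if c = '.' then [] :: split1 cs else
      match split1 cs with
      | [] => [[c]]
      | w :: ws => (c :: w) :: ws

theorem split1_ne_nil (l : List Char) : split1 l ≠ [] := by
  cases l with
  | nil => simp [split1]
  | cons c cs =>
    simp only [split1]
    split
    · simp
    · split <;> simp

theorem go_split1 (fuel : Nat) : ∀ (l : List Char), l.length < fuel → ∀ cur acc,
    PySem.Chars.splitOn.go ['.'] fuel l cur acc
      = acc.reverse ++ (split1 l).modifyHead (cur.reverse ++ ·) := by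
  induction fuel with
  | zero => intro l h; omega
  | succ f ih =>
    intro l h cur acc
    cases l with
    | nil => simp [PySem.Chars.splitOn.go, split1]
    | cons c rest =>
      rw [PySem.Chars.splitOn.go]
      by_cases hc : c = '.'
      · simp only [hc, List.isPrefixOf, BEq.rfl, Bool.and_true, if_true]
        show PySem.Chars.splitOn.go ['.'] f rest [] (cur.reverse :: acc) = _
        rw [ih rest (by simpa using h) [] (List.cons cur.reverse acc)]
        simp [split1]
        cases split1 rest <;> simp
      · have hpre : List.isPrefixOf ['.'] (c :: rest) = false := by
          simp only [List.isPrefixOf, Bool.and_true, beq_eq_false_iff_ne, ne_eq]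
          exact fun h => hc h.symm
        simp only [hpre, Bool.false_eq_true, if_false]
        rw [ih rest (by simpa using h) (c :: cur) acc]
        simp only [split1, if_neg hc]
        cases hs : split1 rest with
        | nil => exact absurd hs (split1_ne_nil rest)
        | cons w ws => simp

theorem splitOn_eq_split1 (l : List Char) : PySem.Chars.splitOn l ['.'] = split1 l := by
  show PySem.Chars.splitOn.go ['.'] (l.length + 1) l [] [] = _
  rw [go_split1 (l.length + 1) l (by omega) [] []]
  cases split1 l <;> simp

-- A's loop, restated as a structural recursion on the remaining characters
def accumF (dots : Nat) (curr : List Char) : List Char → List Char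
  | [] => curr
  | c :: cs =>
    if c = '.' then (if dots % 2 = 0 then curr else curr.reverse) ++ '.' :: accumF (dots + 1) [] cs
    else accumF dots (curr ++ [c]) cs

theorem foldA_eq_accumF (cs : List Char) : ∀ res curr dots,
    (cs.foldl reverseAltWordsStep (res, curr, dots)).1 ++ (cs.foldl reverseAltWordsStep (res, curr, dots)).2.1
      = res ++ accumF dots curr cs := by
  induction cs with
  | nil => intro res curr dots; simp [accumF]
  | cons c rest ih =>
    intro res curr dots
    by_cases hc : c = '.'
    · by_cases hd : dots % 2 = 0
      · simp only [List.foldl_cons, reverseAltWordsStep, hc, hd, accumF, if_true, and_true,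
          ne_eq, not_true_eq_false, and_false, if_false]
        rw [ih]
        simp
      · simp only [List.foldl_cons, reverseAltWordsStep, hc, hd, accumF, and_false, if_false,
          ne_eq, not_false_eq_true, and_true, if_true]
        rw [ih]
        simp
    · simp only [List.foldl_cons, reverseAltWordsStep, hc, accumF, false_and, if_false]
      exact ih res (curr ++ [c]) dots

-- the same accumulation, driven by the word list instead of the characters
def joinAlt (p : Nat) (curr : List Char) : List (List Char) → List Char
  | [] => curr
  | [w] => curr ++ w
  | w :: w' :: ws =>
    (if p = 1 then (curr ++ w).reverse else curr ++ w) ++ '.' :: joinAlt (1 - p) [] (w' :: ws)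

theorem accumF_eq_joinAlt (cs : List Char) : ∀ dots curr,
    accumF dots curr cs = joinAlt (dots % 2) curr (split1 cs) := by
  induction cs with
  | nil => intro dots curr; simp [accumF, split1, joinAlt]
  | cons c rest ih =>
    intro dots curr
    by_cases hc : c = '.'
    · simp only [accumF, split1, hc, if_true]
      rw [ih (dots + 1) []]
      cases hs : split1 rest with
      | nil => exact absurd hs (split1_ne_nil rest)
      | cons w ws =>
        simp only [joinAlt]
        have h2 : (dots + 1) % 2 = 1 - dots % 2 := by omega
        by_cases hd : dots % 2 = 0
        · simp [hd, h2]
        · have hd1 : dots % 2 = 1 := by omega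
          simp [hd1, h2]
    · simp only [accumF, split1, hc, if_false]
      rw [ih dots (curr ++ [c])]
      cases hs : split1 rest with
      | nil => exact absurd hs (split1_ne_nil rest)
      | cons w ws =>
        cases ws with
        | nil => simp [joinAlt]
        | cons w' ws' => simp [joinAlt]

theorem joinAlt_eq_mapIdx (ws : List (List Char)) : ∀ p : Nat,
    joinAlt (p % 2) [] ws
      = PySem.Chars.join ['.'] (ws.mapIdx fun i w => if i + 1 < ws.length ∧ (i + p) % 2 = 1 then w.reverse else w) := by
  induction ws with
  | nil => intro p; simp [joinAlt, PySem.Chars.join_nil]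
  | cons w rest ih =>
    intro p
    cases rest with
    | nil => simp [joinAlt, PySem.Chars.join_singleton]
    | cons w' ws' =>
      have hmap : (w :: w' :: ws').mapIdx (fun i v => if i + 1 < (w :: w' :: ws').length ∧ (i + p) % 2 = 1 then v.reverse else v)
          = (if p % 2 = 1 then w.reverse else w)
            :: (w' :: ws').mapIdx (fun i v => if i + 1 < (w' :: ws').length ∧ (i + (p + 1)) % 2 = 1 then v.reverse else v) := by
        rw [List.mapIdx_cons]
        congr 1
        · simp
        · congr 1
          funext i v
          have h2 : (i + 1 + p) % 2 = (i + (p + 1)) % 2 := by omega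
          have h1 : i + 1 + 1 < ws'.length + 1 + 1 ↔ i + 1 < ws'.length + 1 := by omega
          simp only [List.length_cons, h2, h1]
          split <;> rfl
      have hne : (w' :: ws').mapIdx (fun i v => if i + 1 < (w' :: ws').length ∧ (i + (p + 1)) % 2 = 1 then v.reverse else v)
          = (if 0 + 1 < (w' :: ws').length ∧ (0 + (p + 1)) % 2 = 1 then w'.reverse else w')
            :: ws'.mapIdx (fun i v => if i + 1 + 1 < (w' :: ws').length ∧ (i + 1 + (p + 1)) % 2 = 1 then v.reverse else v) := by
        rw [List.mapIdx_cons]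
      rw [hmap, hne, PySem.Chars.join_cons_cons, ← hne, ← ih (p + 1)]
      simp only [joinAlt]
      have h2 : 1 - p % 2 = (p + 1) % 2 := by omega
      rw [h2]
      by_cases hp : p % 2 = 1 <;> simp [hp]

-- ===== VERDICT (by name: the statement is the Claim_ definition above) =====
theorem reverseAltWords_spec : Claim_equal_reverseAltWords := by
  unfold Claim_equal_reverseAltWords
  intro s _
  show reverseAltWords s = reverseAltWords_alt s
  unfold reverseAltWords reverseAltWords_alt
  simp only [splitOn_eq_split1]
  congr 1
  rw [foldA_eq_accumF s.toList [] [] 0, accumF_eq_joinAlt s.toList 0 []]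
  have := joinAlt_eq_mapIdx (split1 s.toList) 0
  simp only [Nat.add_zero] at this
  simpa using this
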